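-- pv_equiv track=rewrite | github.com/codsod/blog | 每日选做/树/火星勘探.py | preorderfit
-- ===== SOURCE A (Python) =====
-- from collections import defaultdict
--
-- def preorderfit(numl):
--     stack=[]
--     sons=defaultdict(int)
--     if numl[0]!='#':
--         stack.append(numl[0])
--     for i in range(1,len(numl)):
--         if stack:
--             sons[stack[-1]]+=1
--             if sons[stack[-1]]==2:
--                 stack.pop()
--             if numl[i]!='#':
--                 stack.append(i)
--         else:
--             return False
--     if  stack:
--         return False
--     return True
-- ===== SOURCE B (Python) =====
-- def preorderfit(numl):
--     # slots = number of open child edges; root consumes nothing but opens 2 (or 0 if '#')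
--     slots = 2 if numl[0] != '#' else 0
--     for x in numl[1:]:
--         if slots == 0:
--             return False
--         slots -= 1
--         if x != '#':
--             slots += 2
--     return slots == 0
-- ===== Notes on version B (the rewrite author's own statement) =====
-- stated objective: idiomatic
-- what changed: Replaces the explicit stack plus per-node defaultdict child counters with a single integer counter of open child slots (decrement per node, +2 per internal node), eliminating all push/pop and dictionary bookkeeping.
import Mathlib
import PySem

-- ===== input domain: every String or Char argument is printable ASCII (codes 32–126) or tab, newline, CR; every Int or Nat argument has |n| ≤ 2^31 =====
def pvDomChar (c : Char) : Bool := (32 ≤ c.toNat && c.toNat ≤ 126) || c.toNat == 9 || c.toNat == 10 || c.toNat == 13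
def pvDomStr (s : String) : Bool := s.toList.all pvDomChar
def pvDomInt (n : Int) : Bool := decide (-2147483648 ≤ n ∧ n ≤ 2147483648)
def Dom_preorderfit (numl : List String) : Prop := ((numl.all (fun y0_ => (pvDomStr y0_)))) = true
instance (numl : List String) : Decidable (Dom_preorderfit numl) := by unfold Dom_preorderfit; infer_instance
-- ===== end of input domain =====

-- B replaces A's stack + per-node defaultdict child counters with one integer counter of
-- open child slots (idiomatic; same O(n) cost).

-- ===== PORT A =====
-- A's stack holds numl[0] (a string) at the bottom and integer indices above it;
-- AKey is that mixed-type Python value.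
inductive AKey where
  | root : String → AKey
  | idx : Nat → AKey
deriving DecidableEq, Repr

-- the 'for i in range(1, len(numl))' loop of A, with its early 'return False'
def preorderLoopA (numl : List String) (i : Nat) (stack : List AKey)
    (sons : PySem.Dict AKey Int) : Bool :=
  if h : i < numl.length then
    match stack with
    | [] => false                                  -- else: return False
    | top :: rest =>
      let sons' := sons.insert top (sons.getD top 0 + 1)   -- sons[stack[-1]] += 1
      let stack' := if sons'.getD top 0 == 2 then rest else top :: rest  -- pop
      let stack'' := if numl[i] ≠ "#" then AKey.idx i :: stack' else stack'  -- append i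
      preorderLoopA numl (i + 1) stack'' sons'
  else
    if stack.isEmpty then true else false          -- if stack: return False; return True
termination_by numl.length - i

def preorderfit (numl : List String) : Bool :=
  match numl with
  | [] => false  -- Python raises IndexError on numl[0]; excluded by Pre_preorderfit
  | x :: _ =>
    let stack : List AKey := if x ≠ "#" then [AKey.root x] else []
    preorderLoopA numl 1 stack PySem.Dict.empty

-- ===== PORT B =====
-- the 'for x in numl[1:]' loop of B
def altLoopB : List String → Int → Bool
  | [], slots => slots == 0
  | x :: rest, slots =>
    if slots == 0 then false
    else
      let slots := slots - 1
      let slots := if x ≠ "#" then slots + 2 else slots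
      altLoopB rest slots

def preorderfit_alt (numl : List String) : Bool :=
  match numl with
  | [] => false  -- Python raises IndexError on numl[0]; excluded by Pre_preorderfit
  | x :: rest => altLoopB rest (if x ≠ "#" then 2 else 0)

-- ===== PRECONDITION & SPEC =====
-- Pre_ excludes only the empty list, where both Pythons raise IndexError on numl[0].
def Pre_preorderfit (numl : List String) : Prop := numl ≠ []
instance (numl : List String) : Decidable (Pre_preorderfit numl) := by
  unfold Pre_preorderfit; infer_instance

def pvWitness_preorderfit : List String := ["#"]

def Spec_preorderfit (numl : List String) (out : Bool) : Prop := out = preorderfit_alt numl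
instance (numl : List String) (out : Bool) : Decidable (Spec_preorderfit numl out) := by
  unfold Spec_preorderfit; infer_instance

-- ===== CLAIM (what is proved, stated in full; the proofs are below) =====
def Claim_equal_preorderfit : Prop := ∀ (numl : List String), Dom_preorderfit numl → Pre_preorderfit numl → Spec_preorderfit numl (preorderfit numl)

-- ===== LEMMAS AND PROOFS =====

-- number of open child slots represented by A's stack/sons state
def slotSum (stack : List AKey) (sons : PySem.Dict AKey Int) : Int :=
  (stack.map (fun k => 2 - sons.getD k 0)).sum

-- the invariant A's loop maintains at index i
def InvA (i : Nat) (stack : List AKey) (sons : PySem.Dict AKey Int) : Prop :=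
  stack.Nodup ∧
  (∀ k ∈ stack, sons.getD k 0 ≤ 1) ∧
  (∀ j : Nat, i ≤ j → AKey.idx j ∉ stack ∧ sons.getD (AKey.idx j) 0 = 0)

lemma slotSum_nonneg (stack : List AKey) (sons : PySem.Dict AKey Int)
    (h : ∀ k ∈ stack, sons.getD k 0 ≤ 1) : 0 ≤ slotSum stack sons := by
  induction stack with
  | nil => simp [slotSum]
  | cons k tl ih =>
    have hk := h k (by simp)
    have htl := ih (fun k hk => h k (by simp [hk]))
    simp only [slotSum, List.map_cons, List.sum_cons] at *
    omega

lemma slotSum_pos (stack : List AKey) (sons : PySem.Dict AKey Int)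
    (h : ∀ k ∈ stack, sons.getD k 0 ≤ 1) (hne : stack ≠ []) : 1 ≤ slotSum stack sons := by
  match stack with
  | k :: tl =>
    have hk := h k (by simp)
    have htl := slotSum_nonneg tl sons (fun k hk => h k (by simp [hk]))
    simp only [slotSum, List.map_cons, List.sum_cons] at *
    omega

lemma loopA_eq_altLoopB (numl : List String) :
    ∀ (rest : List String) (i : Nat) (stack : List AKey) (sons : PySem.Dict AKey Int),
      numl.drop i = rest → InvA i stack sons →
      preorderLoopA numl i stack sons = altLoopB rest (slotSum stack sons) := by
  intro rest
  induction rest with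
  | nil =>
    intro i stack sons hdrop hinv
    have hlen : numl.length ≤ i := by
      rw [← List.drop_eq_nil_iff]; exact hdrop
    rw [preorderLoopA, dif_neg (by omega)]
    obtain ⟨hnd, hle, hfresh⟩ := hinv
    match stack with
    | [] => simp [slotSum, altLoopB]
    | k :: tl =>
      have h1 := slotSum_pos (k :: tl) sons hle (by simp)
      have h2 : (slotSum (k :: tl) sons == 0) = false := by
        simp only [beq_eq_false_iff_ne, ne_eq]; omega
      simp [altLoopB, h2]
  | cons x rest' ih =>
    intro i stack sons hdrop hinv
    have hlt : i < numl.length := by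
      by_contra hge
      rw [List.drop_eq_nil_of_le (by omega)] at hdrop
      simp at hdrop
    have hx : numl[i] = x := by
      have h0 : (numl.drop i)[0]'(by rw [hdrop]; simp) = x := by simp [hdrop]
      rwa [List.getElem_drop] at h0
    have hdrop' : numl.drop (i + 1) = rest' := by
      rw [← List.drop_drop, hdrop]; simp
    obtain ⟨hnd, hle, hfresh⟩ := hinv
    rw [preorderLoopA, dif_pos hlt]
    match stack with
    | [] =>
      simp only [slotSum, List.map_nil, List.sum_nil, altLoopB]
      rw [if_pos (by simp)]
    | top :: tl =>
      simp only []
      have hc1 : sons.getD top 0 ≤ 1 := hle top (by simp)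
      have hc0 : 0 ≤ slotSum tl sons :=
        slotSum_nonneg tl sons (fun k hk => hle k (by simp [hk]))
      have htopne : ∀ j : Nat, i ≤ j → top ≠ AKey.idx j := by
        intro j hj heq
        exact (hfresh j hj).1 (heq ▸ List.mem_cons_self)
      have htopnotl : top ∉ tl := (List.nodup_cons.mp hnd).1
      have hslot : slotSum (top :: tl) sons = (2 - sons.getD top 0) + slotSum tl sons := by
        simp [slotSum]
      have hpos : slotSum (top :: tl) sons ≠ 0 := by
        have := slotSum_pos (top :: tl) sons hle (by simp)
        omega
      set sons' := sons.insert top (sons.getD top 0 + 1) with hsons'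
      have hgetTop : sons'.getD top 0 = sons.getD top 0 + 1 := by
        rw [hsons', PySem.Dict.getD_insert]; simp
      have hgetNe : ∀ k, k ≠ top → sons'.getD k 0 = sons.getD k 0 := by
        intro k hk
        rw [hsons', PySem.Dict.getD_insert, if_neg hk]
      have htl_same : slotSum tl sons' = slotSum tl sons := by
        unfold slotSum
        congr 1
        apply List.map_congr_left
        intro k hk
        rw [hgetNe k (by intro h; exact htopnotl (h ▸ hk))]
      set stack' := if sons'.getD top 0 == 2 then tl else top :: tl with hstack'
      have hslot' : slotSum stack' sons' = slotSum (top :: tl) sons - 1 := by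
        rw [hstack']
        by_cases h2 : sons.getD top 0 = 1
        · rw [if_pos (by rw [hgetTop, h2]; decide)]
          rw [htl_same]; omega
        · rw [if_neg (by rw [hgetTop]; simp; omega)]
          have h3 : slotSum (top :: tl) sons' = (2 - sons'.getD top 0) + slotSum tl sons' := by
            simp [slotSum]
          rw [h3, hgetTop, htl_same]; omega
      have hmem_stack' : ∀ k ∈ stack', k ∈ top :: tl := by
        intro k hk
        rw [hstack'] at hk
        split at hk
        · exact List.mem_cons_of_mem _ hk
        · exact hk
      have hle' : ∀ k ∈ stack', sons'.getD k 0 ≤ 1 := by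
        intro k hk
        by_cases hkt : k = top
        · subst hkt
          rw [hgetTop]
          rw [hstack'] at hk
          split at hk
          · exact absurd hk htopnotl
          · rename_i hkeep
            rw [hgetTop] at hkeep
            simp at hkeep
            omega
        · rw [hgetNe k hkt]
          exact hle k (hmem_stack' k hk)
      have hnd' : stack'.Nodup := by
        rw [hstack']
        split
        · exact (List.nodup_cons.mp hnd).2
        · exact hnd
      have hfresh' : ∀ j : Nat, i + 1 ≤ j → AKey.idx j ∉ stack' ∧ sons'.getD (AKey.idx j) 0 = 0 := by
        intro j hj
        refine ⟨fun hmem => (hfresh j (by omega)).1 (hmem_stack' _ hmem), ?_⟩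
        rw [hgetNe _ (by intro h; exact htopne j (by omega) h.symm)]
        exact (hfresh j (by omega)).2
      by_cases hxh : x ≠ "#"
      · have hxn : numl[i] ≠ "#" := by rw [hx]; exact hxh
        rw [if_pos hxn]
        have hidx_notin : AKey.idx i ∉ stack' := fun hmem =>
          (hfresh i le_rfl).1 (hmem_stack' _ hmem)
        have hidx_get : sons'.getD (AKey.idx i) 0 = 0 := by
          rw [hgetNe _ (by intro h; exact htopne i le_rfl h.symm)]
          exact (hfresh i le_rfl).2
        have hinv' : InvA (i + 1) (AKey.idx i :: stack') sons' := by
          refine ⟨List.nodup_cons.mpr ⟨hidx_notin, hnd'⟩, ?_, ?_⟩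
          · intro k hk
            rcases List.mem_cons.mp hk with h | h
            · subst h; rw [hidx_get]; omega
            · exact hle' k h
          · intro j hj
            refine ⟨?_, (hfresh' j hj).2⟩
            intro hmem
            rcases List.mem_cons.mp hmem with h | h
            · injection h with h; omega
            · exact (hfresh' j hj).1 h
        rw [ih (i + 1) (AKey.idx i :: stack') sons' hdrop' hinv']
        have hs : slotSum (AKey.idx i :: stack') sons' = slotSum (top :: tl) sons - 1 + 2 := by
          have h4 : slotSum (AKey.idx i :: stack') sons' =
              (2 - sons'.getD (AKey.idx i) 0) + slotSum stack' sons' := by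
            simp [slotSum]
          rw [h4, hidx_get, hslot']; omega
        rw [hs, altLoopB, if_neg (by simp; omega)]
        simp [hxh]
      · have hxn : ¬ numl[i] ≠ "#" := by rw [hx]; exact hxh
        rw [if_neg hxn]
        rw [ih (i + 1) stack' sons' hdrop' ⟨hnd', hle', hfresh'⟩, hslot']
        rw [altLoopB, if_neg (by simp; omega)]
        simp at hxh
        simp [hxh]

-- ===== VERDICT (by name: the statement is the Claim_ definition above) =====
theorem preorderfit_spec : Claim_equal_preorderfit := by
  intro numl _ hpre
  unfold Spec_preorderfit
  match numl with
  | [] => exact absurd rfl hpre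
  | x :: rest =>
    show preorderLoopA (x :: rest) 1 (if x ≠ "#" then [AKey.root x] else []) PySem.Dict.empty =
      altLoopB rest (if x ≠ "#" then 2 else 0)
    have hinv0 : ∀ s : List AKey, s.Nodup → (∀ j : Nat, AKey.idx j ∉ s) →
        InvA 1 s PySem.Dict.empty := by
      intro s hnd hni
      exact ⟨hnd, fun k _ => by simp [PySem.Dict.getD_empty],
        fun j _ => ⟨hni j, by simp [PySem.Dict.getD_empty]⟩⟩
    by_cases hx : x ≠ "#"
    · rw [if_pos hx, if_pos hx]
      rw [loopA_eq_altLoopB (x :: rest) rest 1 [AKey.root x] PySem.Dict.empty (by simp)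
        (hinv0 _ (by simp) (by intro j; simp))]
      simp [slotSum, PySem.Dict.getD_empty]
    · rw [if_neg hx, if_neg hx]
      rw [loopA_eq_altLoopB (x :: rest) rest 1 [] PySem.Dict.empty (by simp)
        (hinv0 _ (by simp) (by intro j; simp))]
      simp [slotSum]
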